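-- pv_equiv track=rewrite | github.com/blankjul/dtree-python | src/join.py | join_index
-- ===== SOURCE A (Python) =====
-- def join_index(p_lDictRows):
--     lResult = []
--     # search for the smallest list
--     lNums = [len(dRow) for dRow in p_lDictRows]
--     index_min = lNums.index(min(lNums))
--     # iterate through the list
--     for iEntry in p_lDictRows[index_min]:
--         bAdd = True
--         for i, dRow in enumerate(p_lDictRows):
--             if i == index_min: continue
--             elif iEntry not in dRow:
--                 bAdd = False
--                 break
--         if bAdd: lResult.append(iEntry)
--     return lResult
-- ===== SOURCE B (Python) =====
-- def join_index(p_lDictRows):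
--     smallest = min(p_lDictRows, key=len)
--     common = set(smallest)
--     for row in p_lDictRows:
--         common &= set(row)
--     return [k for k in smallest if k in common]
-- ===== Notes on version B (the rewrite author's own statement) =====
-- stated objective: idiomatic
-- what changed: Replaces the index-of-minimum scan plus the per-entry nested membership loop by min(key=len), a set-intersection pass over all rows, and a final order-restoring filter over the smallest dict's keys.
import Mathlib
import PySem

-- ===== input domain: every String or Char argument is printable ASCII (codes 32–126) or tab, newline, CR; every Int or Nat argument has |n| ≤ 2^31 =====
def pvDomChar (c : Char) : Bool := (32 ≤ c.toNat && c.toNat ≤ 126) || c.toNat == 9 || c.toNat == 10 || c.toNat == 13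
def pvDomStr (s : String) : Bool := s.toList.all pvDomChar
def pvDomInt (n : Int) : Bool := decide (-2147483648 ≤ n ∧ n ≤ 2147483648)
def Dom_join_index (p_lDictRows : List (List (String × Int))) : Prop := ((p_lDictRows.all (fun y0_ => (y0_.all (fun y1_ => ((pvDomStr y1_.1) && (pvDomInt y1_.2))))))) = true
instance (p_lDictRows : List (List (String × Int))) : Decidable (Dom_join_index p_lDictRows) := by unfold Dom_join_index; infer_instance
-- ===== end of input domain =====

-- B replaces A's index-of-minimum scan and nested membership loop by min(key=len),
-- a set-intersection pass, and an order-restoring filter (idiomatic; same cost).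

-- ===== PORT A =====
-- Literal port of A: lengths list, index of its minimum, then for each key of the
-- smallest dict an inner enumerate-scan over all rows (break = List.all).
def join_index (p_lDictRows : List (List (String × Int))) : List String :=
  let lNums : List Int := p_lDictRows.map (fun d => (d.length : Int))
  match PySem.List.min? lNums (fun x => x) with
  | none => []      -- min([]) raises ValueError; excluded by Pre_
  | some m =>
    match PySem.List.index? lNums m with
    | none => []    -- unreachable (min is a member)
    | some index_min =>
      match PySem.List.pyGet? p_lDictRows (index_min : Int) with
      | none => []  -- unreachable (index in range)
      | some row =>
        -- iterating a dict yields its keys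
        (row.map Prod.fst).foldl (fun lResult iEntry =>
          let bAdd := (PySem.List.enumerate p_lDictRows).all (fun p =>
            p.1 == (index_min : Int) || p.2.any (fun q => q.1 == iEntry))
          if bAdd then lResult ++ [iEntry] else lResult) []

-- ===== PORT B =====
-- min(p_lDictRows, key=len): first row of minimal length (hand-ported running fold)
def pvMinRow (r0 : List (String × Int)) (rest : List (List (String × Int))) :
    List (String × Int) :=
  rest.foldl (fun best r => if r.length < best.length then r else best) r0

def join_index_alt (p_lDictRows : List (List (String × Int))) : List String :=
  match p_lDictRows with
  | [] => []        -- min([]) raises ValueError; excluded by Pre_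
  | r0 :: rest =>
    let smallest := pvMinRow r0 rest
    let common0 := PySem.Set.ofList (smallest.map Prod.fst)
    let common := p_lDictRows.foldl
      (fun c row => PySem.Set.inter c (row.map Prod.fst)) common0
    (smallest.map Prod.fst).filter (fun k => PySem.Set.contains common k)

-- ===== PRECONDITION & SPEC =====
-- Pre_ excludes only the empty list, on which both A and B raise ValueError (min of empty sequence).
def Pre_join_index (p_lDictRows : List (List (String × Int))) : Prop := p_lDictRows ≠ []
instance (p_lDictRows : List (List (String × Int))) : Decidable (Pre_join_index p_lDictRows) := by unfold Pre_join_index; infer_instance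
def pvWitness_join_index : (List (List (String × Int))) := [[("a", 1), ("b", 2)], [("b", 3)]]
def Spec_join_index (p_lDictRows : List (List (String × Int))) (out : List String) : Prop := out = join_index_alt p_lDictRows
instance (p_lDictRows : List (List (String × Int))) (out : List String) : Decidable (Spec_join_index p_lDictRows out) := by unfold Spec_join_index; infer_instance

-- ===== CLAIM (what is proved, stated in full; the proofs are below) =====
def Claim_equal_join_index : Prop := ∀ (p_lDictRows : List (List (String × Int))), Dom_join_index p_lDictRows → Pre_join_index p_lDictRows → Spec_join_index p_lDictRows (join_index p_lDictRows)

-- ===== LEMMAS AND PROOFS =====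

-- "j is the index of the FIRST row of minimal length"
def pvFM (xs : List (List (String × Int))) (j : Nat) : Prop :=
  ∃ h : j < xs.length,
    (∀ i, (hi : i < xs.length) → i < j → xs[j].length < xs[i].length) ∧
    (∀ i, (hi : i < xs.length) → xs[j].length ≤ xs[i].length)

theorem pvFM_unique {xs : List (List (String × Int))} {j k : Nat}
    (hj : pvFM xs j) (hk : pvFM xs k) : j = k := by
  obtain ⟨hjl, hj1, hj2⟩ := hj
  obtain ⟨hkl, hk1, hk2⟩ := hk
  rcases Nat.lt_trichotomy j k with h | h | h
  · have := hk1 j hjl h; have := hj2 k hkl; omega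
  · exact h
  · have := hj1 k hkl h; have := hk2 j hjl; omega

-- the running-min fold picks the first row of minimal length
theorem pvMinRow_spec : ∀ (l : List (List (String × Int))) (b : List (String × Int)),
    (l.foldl (fun best r => if r.length < best.length then r else best) b = b ∧
      ∀ x ∈ l, b.length ≤ x.length) ∨
    (∃ j, ∃ h : j < l.length,
      l.foldl (fun best r => if r.length < best.length then r else best) b = l[j] ∧
      l[j].length < b.length ∧
      (∀ i, (hi : i < l.length) → i < j → l[j].length < l[i].length) ∧
      (∀ i, (hi : i < l.length) → l[j].length ≤ l[i].length)) := by
  intro l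
  induction l with
  | nil => intro b; left; simp
  | cons x t ih =>
    intro b
    by_cases hx : x.length < b.length
    · rcases ih x with ⟨heq, hall⟩ | ⟨j, hjl, heq, hlt, hpre, hmin⟩
      · right
        refine ⟨0, by simp, ?_, ?_, ?_, ?_⟩
        · simp [hx, heq]
        · simpa using hx
        · omega
        · intro i hi
          match i with
          | 0 => simp
          | i + 1 =>
            have hi' : i < t.length := by simpa using hi
            simpa using hall t[i] (List.getElem_mem hi')
      · right
        refine ⟨j + 1, by simpa using hjl, ?_, ?_, ?_, ?_⟩
        · simpa [hx] using heq
        · simpa using by omega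
        · intro i hi hij
          match i with
          | 0 => simpa using by omega
          | i + 1 => simpa using hpre i (by simpa using hi) (by omega)
        · intro i hi
          match i with
          | 0 => simpa using by omega
          | i + 1 => simpa using hmin i (by simpa using hi)
    · rcases ih b with ⟨heq, hall⟩ | ⟨j, hjl, heq, hlt, hpre, hmin⟩
      · left
        constructor
        · simpa [hx] using heq
        · intro y hy
          rcases List.mem_cons.mp hy with h | h
          · subst h; omega
          · exact hall y h
      · right
        refine ⟨j + 1, by simpa using hjl, ?_, ?_, ?_, ?_⟩
        · simpa [hx] using heq
        · simpa using hlt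
        · intro i hi hij
          match i with
          | 0 => simpa using by omega
          | i + 1 => simpa using hpre i (by simpa using hi) (by omega)
        · intro i hi
          match i with
          | 0 => simpa using by omega
          | i + 1 => simpa using hmin i (by simpa using hi)

theorem pvMinRow_FM (r0 : List (String × Int)) (rest : List (List (String × Int))) :
    ∃ j, ∃ h : j < (r0 :: rest).length,
      pvFM (r0 :: rest) j ∧ pvMinRow r0 rest = (r0 :: rest)[j] := by
  rcases pvMinRow_spec rest r0 with ⟨heq, hall⟩ | ⟨j, hjl, heq, hlt, hpre, hmin⟩
  · refine ⟨0, by simp, ⟨by simp, by omega, ?_⟩, by simpa [pvMinRow] using heq⟩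
    intro i hi
    match i with
    | 0 => simp
    | i + 1 =>
      have hi' : i < rest.length := by simpa using hi
      simpa using hall rest[i] (List.getElem_mem hi')
  · refine ⟨j + 1, by simpa using hjl, ⟨by simpa using hjl, ?_, ?_⟩, ?_⟩
    · intro i hi hij
      match i with
      | 0 => simpa using hlt
      | i + 1 => simpa using hpre i (by simpa using hi) (by omega)
    · intro i hi
      match i with
      | 0 => simpa using by omega
      | i + 1 => simpa using hmin i (by simpa using hi)
    · simpa [pvMinRow] using heq

-- membership in the folded intersection
theorem mem_foldl_inter (l : List (List (String × Int))) (c : PySem.Set String)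
    (x : String) :
    x ∈ l.foldl (fun c row => PySem.Set.inter c (row.map Prod.fst)) c ↔
      x ∈ c ∧ ∀ row ∈ l, x ∈ row.map Prod.fst := by
  induction l generalizing c with
  | nil => simp
  | cons r t ih =>
    simp only [List.foldl_cons, ih, PySem.Set.mem_inter, List.forall_mem_cons]
    tauto

theorem join_index_main (r0 : List (String × Int)) (rest : List (List (String × Int))) :
    join_index (r0 :: rest) = join_index_alt (r0 :: rest) := by
  -- abbreviations
  have hlen : ((r0 :: rest).map (fun d => ((d.length : Int)))).length = (r0 :: rest).length := by
    simp
  -- A's selection: min of the lengths list, its first index, the row there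
  obtain ⟨m, hm⟩ : ∃ m, PySem.List.min? ((r0 :: rest).map (fun d => ((d.length : Int)))) (fun x => x) = some m := by
    cases h : PySem.List.min? ((r0 :: rest).map (fun d => ((d.length : Int)))) (fun x => x) with
    | none => exact absurd ((PySem.List.min?_eq_none_iff _ _).mp h) (by simp)
    | some m => exact ⟨m, rfl⟩
  have hmin : ∀ y ∈ (r0 :: rest).map (fun d => ((d.length : Int))), m ≤ y := by
    have := PySem.List.min?_isMin hm
    simpa using this
  obtain ⟨k, hk⟩ : ∃ k, PySem.List.index? ((r0 :: rest).map (fun d => ((d.length : Int)))) m = some k := by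
    cases h : PySem.List.index? ((r0 :: rest).map (fun d => ((d.length : Int)))) m with
    | none => exact (((PySem.List.index?_eq_none_iff _ _).mp h) (PySem.List.min?_mem hm)).elim
    | some k => exact ⟨k, rfl⟩
  obtain ⟨hkl, hkeq, hkne⟩ := PySem.List.getElem_of_index?_eq_some hk
  have hkl' : k < (r0 :: rest).length := by simpa using hkl
  simp only [List.getElem_map] at hkeq hkne
  -- k is the first index of minimal length
  have hFMk : pvFM (r0 :: rest) k := by
    refine ⟨hkl', ?_, ?_⟩
    · intro i hi hik
      have h1 : ((r0 :: rest)[i].length : Int) ≠ m := hkne i (by simpa using hik)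
      have h2 : m ≤ ((r0 :: rest)[i].length : Int) := hmin _ (by
        exact List.mem_map_of_mem (List.getElem_mem hi))
      have h3 : ((r0 :: rest)[k].length : Int) = m := hkeq
      omega
    · intro i hi
      have h2 : m ≤ ((r0 :: rest)[i].length : Int) := hmin _ (by
        exact List.mem_map_of_mem (List.getElem_mem hi))
      have h3 : ((r0 :: rest)[k].length : Int) = m := hkeq
      omega
  -- B's selection is the same row
  obtain ⟨j, hjl, hFMj, hminrow⟩ := pvMinRow_FM r0 rest
  have hrow : pvMinRow r0 rest = (r0 :: rest)[k]'hkl' := by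
    have hjk : j = k := pvFM_unique hFMj hFMk
    subst hjk
    exact hminrow
  have hget : PySem.List.pyGet? (r0 :: rest) ((k : Nat) : Int) = some ((r0 :: rest)[k]) := by
    simp [PySem.List.pyGet?_natCast, List.getElem?_eq_getElem hkl']
  -- reduce both ports
  rw [join_index, join_index_alt]
  simp only [hm, hk, hget]
  rw [PySem.List.foldl_append_if_eq_filter, hrow]
  rw [List.nil_append]
  -- pointwise equality of the two filters
  apply List.filter_congr
  intro key hkey
  rw [Bool.eq_iff_iff]
  rw [List.all_eq_true]
  rw [PySem.Set.contains_iff, mem_foldl_inter, PySem.Set.mem_ofList]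
  constructor
  · intro hall
    refine ⟨hkey, ?_⟩
    intro row hrow
    obtain ⟨i, hi, rfl⟩ := List.mem_iff_getElem.mp hrow
    have := hall (((i : Nat) : Int), (r0 :: rest)[i]) (by
      rw [PySem.List.mem_enumerate_iff]
      exact ⟨i, hi, by simp⟩)
    simp only [Bool.or_eq_true, beq_iff_eq, List.any_eq_true] at this
    rcases this with h | h
    · have : i = k := by exact_mod_cast h
      subst this
      simpa using hkey
    · obtain ⟨q, hq, hq2⟩ := h
      exact List.mem_map.mpr ⟨q, hq, hq2⟩
  · rintro ⟨-, hall⟩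
    intro p hp
    rw [PySem.List.mem_enumerate_iff] at hp
    obtain ⟨i, hi, rfl⟩ := hp
    simp only [Bool.or_eq_true, beq_iff_eq, List.any_eq_true]
    right
    have := hall ((r0 :: rest)[i]) (List.getElem_mem hi)
    obtain ⟨q, hq, hq2⟩ := List.mem_map.mp this
    exact ⟨q, hq, by simpa using hq2⟩

-- ===== VERDICT (by name: the statement is the Claim_ definition above) =====
theorem join_index_spec : Claim_equal_join_index := by
  intro rows _ hpre
  unfold Spec_join_index
  cases rows with
  | nil => exact absurd rfl hpre
  | cons r0 rest => exact join_index_main r0 rest
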